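-- pv_equiv track=rewrite | github.com/ZloyGrot/Lab-3 | matrix.py | get_regions
-- ===== SOURCE A (Python) =====
-- def get_regions(n):
--     r1, r2, r3, r4 = [], [], [], []
--     for i in range(n):
--         for j in range(n):
--             if i < j and i + j < n - 1:
--                 r1.append((i, j))
--             elif i < j and i + j > n - 1:
--                 r2.append((i, j))
--             elif i > j and i + j > n - 1:
--                 r3.append((i, j))
--             elif i > j and i + j < n - 1:
--                 r4.append((i, j))
--     return r1, r2, r3, r4
-- ===== SOURCE B (Python) =====
-- def get_regions(n):
--     r1, r2, r3, r4 = [], [], [], []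
--     for i in range(n):
--         r1 += [(i, j) for j in range(i + 1, n - 1 - i)]
--         r2 += [(i, j) for j in range(max(i + 1, n - i), n)]
--         r3 += [(i, j) for j in range(n - i, i)]
--         r4 += [(i, j) for j in range(0, min(i, n - 1 - i))]
--     return r1, r2, r3, r4
-- ===== Notes on version B (the rewrite author's own statement) =====
-- stated objective: alternative
-- what changed: Replaced the nested n*n loop that tests four region conditions per cell with a single loop over rows that emits each region's cells from directly computed j-ranges, so no per-cell membership test remains.
import Mathlib
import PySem

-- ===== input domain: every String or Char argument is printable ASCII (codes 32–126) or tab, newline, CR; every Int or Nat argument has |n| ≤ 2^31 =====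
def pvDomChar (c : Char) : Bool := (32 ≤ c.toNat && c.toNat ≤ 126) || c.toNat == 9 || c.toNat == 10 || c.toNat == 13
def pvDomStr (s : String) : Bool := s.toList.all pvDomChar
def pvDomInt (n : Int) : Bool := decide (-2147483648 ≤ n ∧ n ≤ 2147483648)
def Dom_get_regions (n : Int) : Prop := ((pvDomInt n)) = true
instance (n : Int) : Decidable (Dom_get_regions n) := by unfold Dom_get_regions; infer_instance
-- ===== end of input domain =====

-- B replaces the nested loop with a per-row computation of each region's j-range
-- (no membership tests per cell); objective: alternative decomposition, same cost class.


abbrev Regs := (List (Int × Int)) × (List (Int × Int)) × (List (Int × Int)) × (List (Int × Int))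

-- ===== PORT A =====
-- the if/elif chain of A's inner loop body
def stepA (n i : Int) (s : Regs) (j : Int) : Regs :=
  if i < j ∧ i + j < n - 1 then (s.1 ++ [(i, j)], s.2.1, s.2.2.1, s.2.2.2)
  else if i < j ∧ i + j > n - 1 then (s.1, s.2.1 ++ [(i, j)], s.2.2.1, s.2.2.2)
  else if i > j ∧ i + j > n - 1 then (s.1, s.2.1, s.2.2.1 ++ [(i, j)], s.2.2.2)
  else if i > j ∧ i + j < n - 1 then (s.1, s.2.1, s.2.2.1, s.2.2.2 ++ [(i, j)])
  else s

def get_regions (n : Int) : Regs :=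
  (PySem.List.pyRange 0 n 1).foldl
    (fun s i => (PySem.List.pyRange 0 n 1).foldl (stepA n i) s)
    ([], [], [], [])

-- ===== PORT B =====
-- B's loop body: for row i, append the directly computed j-range of each region
def stepB (n : Int) (s : Regs) (i : Int) : Regs :=
  (s.1 ++ (PySem.List.pyRange (i + 1) (n - 1 - i) 1).map (fun j => (i, j)),
   s.2.1 ++ (PySem.List.pyRange (max (i + 1) (n - i)) n 1).map (fun j => (i, j)),
   s.2.2.1 ++ (PySem.List.pyRange (n - i) i 1).map (fun j => (i, j)),
   s.2.2.2 ++ (PySem.List.pyRange 0 (min i (n - 1 - i)) 1).map (fun j => (i, j)))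

def get_regions_alt (n : Int) : Regs :=
  (PySem.List.pyRange 0 n 1).foldl (stepB n) ([], [], [], [])

-- ===== PRECONDITION & SPEC =====
def Spec_get_regions (n : Int) (out : (List (Int × Int)) × (List (Int × Int)) × (List (Int × Int)) × (List (Int × Int))) : Prop := out = get_regions_alt n
instance (n : Int) (out : (List (Int × Int)) × (List (Int × Int)) × (List (Int × Int)) × (List (Int × Int))) : Decidable (Spec_get_regions n out) := by unfold Spec_get_regions; infer_instance

-- ===== CLAIM (what is proved, stated in full; the proofs are below) =====
def Claim_equal_get_regions : Prop := ∀ (n : Int), Dom_get_regions n → Spec_get_regions n (get_regions n)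

-- ===== LEMMAS AND PROOFS =====

lemma pyRange_one_nil {a b : Int} (h : b ≤ a) : PySem.List.pyRange a b 1 = [] := by
  simp [PySem.List.pyRange]
  omega

-- filtering an integer interval by a band condition yields the clamped interval
lemma filter_pyRange (lo hi a b : Int) :
    (PySem.List.pyRange a b 1).filter (fun j => decide (lo ≤ j ∧ j < hi))
      = PySem.List.pyRange (max a lo) (min b hi) 1 := by
  by_cases hab : a < b
  · rw [PySem.List.pyRange_one_cons hab, List.filter_cons]
    by_cases hc : lo ≤ a ∧ a < hi
    · rw [if_pos (decide_eq_true hc), filter_pyRange lo hi (a + 1) b,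
        show max (a + 1) lo = a + 1 by omega, show max a lo = a by omega,
        PySem.List.pyRange_one_cons (show a < min b hi by omega)]
    · rw [if_neg (by simp [decide_eq_false hc]), filter_pyRange lo hi (a + 1) b]
      rcases (by omega : a < lo ∨ hi ≤ a) with h | h
      · rw [show max a lo = lo by omega, show max (a + 1) lo = lo by omega]
      · rw [pyRange_one_nil (show min b hi ≤ max (a+1) lo by omega),
            pyRange_one_nil (show min b hi ≤ max a lo by omega)]
  · rw [pyRange_one_nil (by omega), pyRange_one_nil (show min b hi ≤ max a lo by omega)]
    rfl
termination_by (b - a).toNat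
decreasing_by all_goals omega

-- A's inner loop over any list of j's = the four filters, appended to the accumulator
lemma innerA_eq (n i : Int) (L : List Int) (s : Regs) :
    L.foldl (stepA n i) s =
      (s.1 ++ (L.filter (fun j => decide (i < j ∧ i + j < n - 1))).map (fun j => (i, j)),
       s.2.1 ++ (L.filter (fun j => decide (i < j ∧ i + j > n - 1))).map (fun j => (i, j)),
       s.2.2.1 ++ (L.filter (fun j => decide (i > j ∧ i + j > n - 1))).map (fun j => (i, j)),
       s.2.2.2 ++ (L.filter (fun j => decide (i > j ∧ i + j < n - 1))).map (fun j => (i, j))) := by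
  induction L generalizing s with
  | nil => simp
  | cons j L ih =>
    rw [List.foldl_cons]
    simp only [List.filter_cons, decide_eq_true_eq]
    by_cases h1 : i < j ∧ i + j < n - 1
    · have n2 : ¬ (i < j ∧ i + j > n - 1) := by omega
      have n3 : ¬ (i > j ∧ i + j > n - 1) := by omega
      have n4 : ¬ (i > j ∧ i + j < n - 1) := by omega
      have e : stepA n i s j = (s.1 ++ [(i, j)], s.2.1, s.2.2.1, s.2.2.2) := by
        unfold stepA; rw [if_pos h1]
      rw [e, ih, if_pos h1, if_neg n2, if_neg n3, if_neg n4]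
      simp
    · by_cases h2 : i < j ∧ i + j > n - 1
      · have n3 : ¬ (i > j ∧ i + j > n - 1) := by omega
        have n4 : ¬ (i > j ∧ i + j < n - 1) := by omega
        have e : stepA n i s j = (s.1, s.2.1 ++ [(i, j)], s.2.2.1, s.2.2.2) := by
          unfold stepA; rw [if_neg h1, if_pos h2]
        rw [e, ih, if_neg h1, if_pos h2, if_neg n3, if_neg n4]
        simp
      · by_cases h3 : i > j ∧ i + j > n - 1
        · have n4 : ¬ (i > j ∧ i + j < n - 1) := by omega
          have e : stepA n i s j = (s.1, s.2.1, s.2.2.1 ++ [(i, j)], s.2.2.2) := by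
            unfold stepA; rw [if_neg h1, if_neg h2, if_pos h3]
          rw [e, ih, if_neg h1, if_neg h2, if_pos h3, if_neg n4]
          simp
        · by_cases h4 : i > j ∧ i + j < n - 1
          · have e : stepA n i s j = (s.1, s.2.1, s.2.2.1, s.2.2.2 ++ [(i, j)]) := by
              unfold stepA; rw [if_neg h1, if_neg h2, if_neg h3, if_pos h4]
            rw [e, ih, if_neg h1, if_neg h2, if_neg h3, if_pos h4]
            simp
          · have e : stepA n i s j = s := by
              unfold stepA; rw [if_neg h1, if_neg h2, if_neg h3, if_neg h4]
            rw [e, ih, if_neg h1, if_neg h2, if_neg h3, if_neg h4]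

-- one row: A's inner loop over range(n) equals B's direct ranges
lemma row_eq (n i : Int) (hi0 : 0 ≤ i) (hin : i < n) (s : Regs) :
    (PySem.List.pyRange 0 n 1).foldl (stepA n i) s = stepB n s i := by
  rw [innerA_eq]
  unfold stepB
  have f1 : (PySem.List.pyRange 0 n 1).filter (fun j => decide (i < j ∧ i + j < n - 1))
      = PySem.List.pyRange (i + 1) (n - 1 - i) 1 := by
    rw [List.filter_congr (q := fun j => decide (i + 1 ≤ j ∧ j < n - 1 - i))
      (fun j hj => by simp only [decide_eq_decide]; omega)]
    rw [filter_pyRange, show max 0 (i + 1) = i + 1 by omega, show min n (n - 1 - i) = n - 1 - i by omega]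
  have f2 : (PySem.List.pyRange 0 n 1).filter (fun j => decide (i < j ∧ i + j > n - 1))
      = PySem.List.pyRange (max (i + 1) (n - i)) n 1 := by
    rw [List.filter_congr (q := fun j => decide (max (i + 1) (n - i) ≤ j ∧ j < n))
      (fun j hj => by
        have := PySem.List.mem_pyRange_one.mp hj
        simp only [decide_eq_decide]; omega)]
    rw [filter_pyRange, show max 0 (max (i + 1) (n - i)) = max (i + 1) (n - i) by omega,
      show min n n = n by omega]
  have f3 : (PySem.List.pyRange 0 n 1).filter (fun j => decide (i > j ∧ i + j > n - 1))
      = PySem.List.pyRange (n - i) i 1 := by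
    rw [List.filter_congr (q := fun j => decide (n - i ≤ j ∧ j < i))
      (fun j hj => by simp only [decide_eq_decide]; omega)]
    rw [filter_pyRange, show max 0 (n - i) = n - i by omega, show min n i = i by omega]
  have f4 : (PySem.List.pyRange 0 n 1).filter (fun j => decide (i > j ∧ i + j < n - 1))
      = PySem.List.pyRange 0 (min i (n - 1 - i)) 1 := by
    rw [List.filter_congr (q := fun j => decide (0 ≤ j ∧ j < min i (n - 1 - i)))
      (fun j hj => by
        have := PySem.List.mem_pyRange_one.mp hj
        simp only [decide_eq_decide]; omega)]
    rw [filter_pyRange, max_self 0,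
      show min n (min i (n - 1 - i)) = min i (n - 1 - i) by omega]
  rw [f1, f2, f3, f4]

-- ===== VERDICT (by name: the statement is the Claim_ definition above) =====
theorem get_regions_spec : Claim_equal_get_regions := by
  intro n _
  unfold Spec_get_regions get_regions get_regions_alt
  exact PySem.List.foldl_congr_mem _ _ _ _
    (fun s i hi => by
      have := PySem.List.mem_pyRange_one.mp hi
      exact row_eq n i this.1 this.2 s)
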